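-- pv_equiv track=rewrite | github.com/rimko53-beep/TG-BOT | bot.py | get_next_rank
-- ===== SOURCE A (Python) =====
-- RANKS = [
--     (0,   50,  "🌱 Новичок",      "Retail"),
--     (51,  150, "📊 Трейдер",       "Prop Firm"),
--     (151, 350, "📈 Про-Трейдер",   "Institutional"),
--     (351, 700, "🔥 Эксперт",       "Smart Money"),
--     (701, 9999,"👑 Маркет-Мейкер", "Whale"),
-- ]
--
-- def get_next_rank(count):
--     for lo, hi, title, level in RANKS:
--         if lo <= count <= hi:
--             idx = RANKS.index((lo, hi, title, level))
--             if idx + 1 < len(RANKS):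
--                 nxt = RANKS[idx + 1]
--                 return nxt[2], nxt[3], nxt[0] - count
--     return None, None, 0
-- ===== SOURCE B (Python) =====
-- import bisect
--
-- RANKS = [
--     (0,   50,  "🌱 Новичок",      "Retail"),
--     (51,  150, "📊 Трейдер",       "Prop Firm"),
--     (151, 350, "📈 Про-Трейдер",   "Institutional"),
--     (351, 700, "🔥 Эксперт",       "Smart Money"),
--     (701, 9999,"👑 Маркет-Мейкер", "Whale"),
-- ]
--
-- _LOWS = [r[0] for r in RANKS]
--
-- def get_next_rank(count):
--     idx = bisect.bisect_right(_LOWS, count) - 1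
--     if idx < 0 or count > RANKS[idx][1] or idx + 1 >= len(RANKS):
--         return None, None, 0
--     nxt = RANKS[idx + 1]
--     return nxt[2], nxt[3], nxt[0] - count
-- ===== Notes on version B (the rewrite author's own statement) =====
-- stated objective: idiomatic
-- what changed: Replaces A's linear scan over RANKS plus a redundant RANKS.index() re-scan with a single bisect.bisect_right on the precomputed lower bounds followed by direct indexing.
import Mathlib
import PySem

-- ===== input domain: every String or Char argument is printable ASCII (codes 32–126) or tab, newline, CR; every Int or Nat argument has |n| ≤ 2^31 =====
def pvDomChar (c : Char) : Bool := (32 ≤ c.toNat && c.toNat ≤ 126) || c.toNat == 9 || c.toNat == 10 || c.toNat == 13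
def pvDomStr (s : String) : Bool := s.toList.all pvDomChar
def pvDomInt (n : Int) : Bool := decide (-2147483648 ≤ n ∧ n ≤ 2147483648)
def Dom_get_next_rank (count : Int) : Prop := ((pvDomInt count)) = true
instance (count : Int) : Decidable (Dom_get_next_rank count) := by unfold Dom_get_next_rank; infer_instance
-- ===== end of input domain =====

-- B replaces A's linear scan + redundant RANKS.index pass with one bisect on the precomputed lower bounds (idiomatic/alternative; no asymptotic change on a 5-row table).

-- ===== PORT A =====
-- the module constant RANKS
def pvRanks : List (Int × Int × String × String) :=
  [ (0,   50,  "🌱 Новичок",      "Retail"),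
    (51,  150, "📊 Трейдер",       "Prop Firm"),
    (151, 350, "📈 Про-Трейдер",   "Institutional"),
    (351, 700, "🔥 Эксперт",       "Smart Money"),
    (701, 9999,"👑 Маркет-Мейкер", "Whale") ]

-- A's for-loop: first matching tier, then RANKS.index, then the idx+1 guard; falling through continues the loop.
def pvLoopA (count : Int) : List (Int × Int × String × String) → Option String × Option String × Int
  | [] => (none, none, 0)
  | (lo, hi, title, level) :: rest =>
    if lo ≤ count ∧ count ≤ hi then
      match PySem.List.index? pvRanks (lo, hi, title, level) with
      | some idx =>
        if idx + 1 < pvRanks.length then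
          match pvRanks[idx + 1]? with
          | some nxt => (some nxt.2.2.1, some nxt.2.2.2, nxt.1 - count)
          | none => (none, none, 0)   -- unreachable: idx+1 < length
        else pvLoopA count rest       -- Python: the inner if fails, loop continues
      | none => pvLoopA count rest    -- unreachable: the tuple is in RANKS
    else pvLoopA count rest

def get_next_rank (count : Int) : Option String × Option String × Int :=
  pvLoopA count pvRanks

-- ===== PORT B =====
-- _LOWS = [r[0] for r in RANKS]
def pvLows : List Int := pvRanks.map (·.1)

def get_next_rank_alt (count : Int) : Option String × Option String × Int :=
  let idx : Int := (PySem.List.bisectRight pvLows count : Int) - 1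
  -- Python's short-circuit 'or': RANKS[idx] is only read once idx < 0 has failed
  if idx < 0 then (none, none, 0)
  else
    match PySem.List.pyGet? pvRanks idx with
    | none => (none, none, 0)     -- unreachable: 0 ≤ idx < len
    | some r =>
      if count > r.2.1 ∨ idx + 1 ≥ (pvRanks.length : Int) then (none, none, 0)
      else
        match PySem.List.pyGet? pvRanks (idx + 1) with
        | some nxt => (some nxt.2.2.1, some nxt.2.2.2, nxt.1 - count)
        | none => (none, none, 0) -- unreachable under the guard

-- ===== PRECONDITION & SPEC =====
def Spec_get_next_rank (count : Int) (out : Option String × Option String × Int) : Prop := out = get_next_rank_alt count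
instance (count : Int) (out : Option String × Option String × Int) : Decidable (Spec_get_next_rank count out) := by unfold Spec_get_next_rank; infer_instance

-- ===== CLAIM (what is proved, stated in full; the proofs are below) =====
def Claim_equal_get_next_rank : Prop := ∀ (count : Int), Dom_get_next_rank count → Spec_get_next_rank count (get_next_rank count)

-- ===== LEMMAS AND PROOFS =====

-- closed form of bisect_right on the literal _LOWS, from bisectRight_spec
theorem pv_bisect_eval (count : Int) :
    PySem.List.bisectRight pvLows count =
      if count < 0 then 0 else if count < 51 then 1 else if count < 151 then 2
      else if count < 351 then 3 else if count < 701 then 4 else 5 := by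
  obtain ⟨hle, hlo, hhi⟩ := PySem.List.bisectRight_spec pvLows count (by decide)
  set b := PySem.List.bisectRight pvLows count with hb
  have hlen : pvLows.length = 5 := by decide
  have g0 : 1 ≤ b → (0:Int) ≤ count := fun h => by simpa using hlo 0 (by omega) (by omega)
  have g1 : 2 ≤ b → (51:Int) ≤ count := fun h => by simpa using hlo 1 (by omega) (by omega)
  have g2 : 3 ≤ b → (151:Int) ≤ count := fun h => by simpa using hlo 2 (by omega) (by omega)
  have g3 : 4 ≤ b → (351:Int) ≤ count := fun h => by simpa using hlo 3 (by omega) (by omega)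
  have g4 : 5 ≤ b → (701:Int) ≤ count := fun h => by simpa using hlo 4 (by omega) (by omega)
  have k0 : b ≤ 0 → count < (0:Int) := fun h => by simpa using hhi 0 (by omega) (by omega)
  have k1 : b ≤ 1 → count < (51:Int) := fun h => by simpa using hhi 1 (by omega) (by omega)
  have k2 : b ≤ 2 → count < (151:Int) := fun h => by simpa using hhi 2 (by omega) (by omega)
  have k3 : b ≤ 3 → count < (351:Int) := fun h => by simpa using hhi 3 (by omega) (by omega)
  have k4 : b ≤ 4 → count < (701:Int) := fun h => by simpa using hhi 4 (by omega) (by omega)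
  rw [hlen] at hle
  split_ifs with h1 h2 h3 h4 h5 <;> omega

-- ===== VERDICT (by name: the statement is the Claim_ definition above) =====
theorem get_next_rank_spec : Claim_equal_get_next_rank := by
  intro count _
  unfold Spec_get_next_rank get_next_rank get_next_rank_alt
  rw [pv_bisect_eval]
  by_cases h0 : count < 0
  · rw [if_pos h0]
    have l1 : ¬ ((0:Int) ≤ count ∧ count ≤ 50) := by omega
    have l2 : ¬ ((51:Int) ≤ count ∧ count ≤ 150) := by omega
    have l3 : ¬ ((151:Int) ≤ count ∧ count ≤ 350) := by omega
    have l4 : ¬ ((351:Int) ≤ count ∧ count ≤ 700) := by omega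
    have l5 : ¬ ((701:Int) ≤ count ∧ count ≤ 9999) := by omega
    simp [pvLoopA, pvRanks, l1, l2, l3, l4, l5]
  by_cases h1 : count < 51
  · rw [if_neg h0, if_pos h1]
    have l1 : (0:Int) ≤ count ∧ count ≤ 50 := ⟨by omega, by omega⟩
    have hno : ¬ ((50:Int) < count) := by omega
    have i0 : List.idxOf? ((0, 50, "🌱 Новичок", "Retail") : Int × Int × String × String) [(0, 50, "🌱 Новичок", "Retail"), (51, 150, "📊 Трейдер", "Prop Firm"), (151, 350, "📈 Про-Трейдер", "Institutional"), (351, 700, "🔥 Эксперт", "Smart Money"), (701, 9999, "👑 Маркет-Мейкер", "Whale")] = some 0 := by decide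
    simp only [pvLoopA, pvRanks, PySem.List.index?_eq_idxOf?]
    rw [if_pos l1, i0]
    simp [hno, PySem.List.pyGet?, PySem.List.pyIdx?]
  by_cases h2 : count < 151
  · rw [if_neg h0, if_neg h1, if_pos h2]
    have lm : (51:Int) ≤ count ∧ count ≤ 150 := ⟨by omega, by omega⟩
    have hno : ¬ ((150:Int) < count) := by omega
    have im : List.idxOf? ((51, 150, "📊 Трейдер", "Prop Firm") : Int × Int × String × String) [(0, 50, "🌱 Новичок", "Retail"), (51, 150, "📊 Трейдер", "Prop Firm"), (151, 350, "📈 Про-Трейдер", "Institutional"), (351, 700, "🔥 Эксперт", "Smart Money"), (701, 9999, "👑 Маркет-Мейкер", "Whale")] = some 1 := by decide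
    simp only [pvLoopA, pvRanks, PySem.List.index?_eq_idxOf?]
    have ln0 : ¬ ((0:Int) ≤ count ∧ count ≤ 50) := by omega
    rw [if_neg ln0 , if_pos lm, im]
    simp [hno, PySem.List.pyGet?, PySem.List.pyIdx?]
  by_cases h3 : count < 351
  · rw [if_neg h0, if_neg h1, if_neg h2, if_pos h3]
    have lm : (151:Int) ≤ count ∧ count ≤ 350 := ⟨by omega, by omega⟩
    have hno : ¬ ((350:Int) < count) := by omega
    have im : List.idxOf? ((151, 350, "📈 Про-Трейдер", "Institutional") : Int × Int × String × String) [(0, 50, "🌱 Новичок", "Retail"), (51, 150, "📊 Трейдер", "Prop Firm"), (151, 350, "📈 Про-Трейдер", "Institutional"), (351, 700, "🔥 Эксперт", "Smart Money"), (701, 9999, "👑 Маркет-Мейкер", "Whale")] = some 2 := by decide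
    simp only [pvLoopA, pvRanks, PySem.List.index?_eq_idxOf?]
    have ln0 : ¬ ((0:Int) ≤ count ∧ count ≤ 50) := by omega
    have ln1 : ¬ ((51:Int) ≤ count ∧ count ≤ 150) := by omega
    rw [if_neg ln0 , if_neg ln1 , if_pos lm, im]
    simp [hno, PySem.List.pyGet?, PySem.List.pyIdx?]
  by_cases h4 : count < 701
  · rw [if_neg h0, if_neg h1, if_neg h2, if_neg h3, if_pos h4]
    have lm : (351:Int) ≤ count ∧ count ≤ 700 := ⟨by omega, by omega⟩
    have hno : ¬ ((700:Int) < count) := by omega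
    have im : List.idxOf? ((351, 700, "🔥 Эксперт", "Smart Money") : Int × Int × String × String) [(0, 50, "🌱 Новичок", "Retail"), (51, 150, "📊 Трейдер", "Prop Firm"), (151, 350, "📈 Про-Трейдер", "Institutional"), (351, 700, "🔥 Эксперт", "Smart Money"), (701, 9999, "👑 Маркет-Мейкер", "Whale")] = some 3 := by decide
    simp only [pvLoopA, pvRanks, PySem.List.index?_eq_idxOf?]
    have ln0 : ¬ ((0:Int) ≤ count ∧ count ≤ 50) := by omega
    have ln1 : ¬ ((51:Int) ≤ count ∧ count ≤ 150) := by omega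
    have ln2 : ¬ ((151:Int) ≤ count ∧ count ≤ 350) := by omega
    rw [if_neg ln0 , if_neg ln1 , if_neg ln2 , if_pos lm, im]
    simp [hno, PySem.List.pyGet?, PySem.List.pyIdx?]
  · rw [if_neg h0, if_neg h1, if_neg h2, if_neg h3, if_neg h4]
    have ln0 : ¬ ((0:Int) ≤ count ∧ count ≤ 50) := by omega
    have ln1 : ¬ ((51:Int) ≤ count ∧ count ≤ 150) := by omega
    have ln2 : ¬ ((151:Int) ≤ count ∧ count ≤ 350) := by omega
    have ln3 : ¬ ((351:Int) ≤ count ∧ count ≤ 700) := by omega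
    have i4 : List.idxOf? ((701, 9999, "👑 Маркет-Мейкер", "Whale") : Int × Int × String × String) [(0, 50, "🌱 Новичок", "Retail"), (51, 150, "📊 Трейдер", "Prop Firm"), (151, 350, "📈 Про-Трейдер", "Institutional"), (351, 700, "🔥 Эксперт", "Smart Money"), (701, 9999, "👑 Маркет-Мейкер", "Whale")] = some 4 := by decide
    simp only [pvLoopA, pvRanks, PySem.List.index?_eq_idxOf?]
    rw [if_neg ln0, if_neg ln1, if_neg ln2, if_neg ln3]
    simp [i4]
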